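-- pv_equiv track=rewrite | github.com/smarquesgomez/helper | ifxanalyzer/analyzers/consumo_cpu_vps.py | _parse_rea
-- ===== SOURCE A (Python) =====
-- def _parse_rea(lines):
--     in_table = False; count = 0
--     for line in lines:
--         s = line.strip()
--         if s.startswith("Ready threads:"): in_table = True; continue
--         if in_table:
--             if s.startswith("tid"): continue
--             if not s: break
--             if s.split()[0].isdigit(): count += 1
--     return count
-- ===== SOURCE B (Python) =====
-- def _parse_rea(lines):
--     ss = [line.strip() for line in lines]
--     head = next((i for i, s in enumerate(ss) if s.startswith("Ready threads:")), None)
--     if head is None: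
--         return 0
--     tail = ss[head + 1:]
--     try:
--         body = tail[:tail.index("")]
--     except ValueError:
--         body = tail
--     return sum(1 for s in body if s.split()[0].isdigit())
-- ===== Notes on version B (the rewrite author's own statement) =====
-- stated objective: alternative
-- what changed: Replaced A's single stateful scan (in_table flag, continue/break) by a three-phase pipeline: strip all lines, locate the 'Ready threads:' header, cut the tail at the first blank line, then count body rows whose first token is numeric (the 'tid' header fails that test naturally).
import Mathlib
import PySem

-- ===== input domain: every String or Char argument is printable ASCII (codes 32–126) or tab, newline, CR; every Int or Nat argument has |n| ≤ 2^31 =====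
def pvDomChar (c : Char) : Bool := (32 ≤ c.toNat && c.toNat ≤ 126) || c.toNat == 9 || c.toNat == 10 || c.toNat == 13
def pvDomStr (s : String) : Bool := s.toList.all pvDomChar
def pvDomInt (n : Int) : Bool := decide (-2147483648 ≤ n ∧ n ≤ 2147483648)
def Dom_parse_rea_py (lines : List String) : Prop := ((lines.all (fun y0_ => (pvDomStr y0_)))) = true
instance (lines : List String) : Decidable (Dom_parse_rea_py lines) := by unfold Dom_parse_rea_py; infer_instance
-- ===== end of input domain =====

-- B replaces A's single stateful scan (in_table flag + break) by a find-the-header /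
-- cut-at-first-blank / count-numeric-rows pipeline over the stripped lines (objective: alternative decomposition).

-- ===== PORT A =====
-- the for-loop of A with its (in_table, count) state; 'break' returns count directly
def parseReaGo : List String → Bool → Int → Int
  | [], _, count => count
  | line :: rest, in_table, count =>
    let s := PySem.Str.strip line
    if PySem.Str.startswith s "Ready threads:" then parseReaGo rest true count
    else if in_table then
      if PySem.Str.startswith s "tid" then parseReaGo rest in_table count
      else if s = "" then count
      else if PySem.Str.strIsdigit ((PySem.Str.split₀ s).headD "") then parseReaGo rest in_table (count + 1)
      else parseReaGo rest in_table count
    else parseReaGo rest false count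
    -- s.split()[0]: s is non-empty here, so split() is non-empty and the [0] never raises;
    -- headD "" is that element (the "" default is unreachable)

def parse_rea_py (lines : List String) : Int := parseReaGo lines false 0

-- ===== PORT B =====
def parse_rea_py_alt (lines : List String) : Int :=
  let ss := lines.map PySem.Str.strip
  match ss.findIdx? (fun s => PySem.Str.startswith s "Ready threads:") with
  | none => 0                                   -- next(…, None) found nothing
  | some i =>
    let tail := ss.drop (i + 1)                 -- ss[head+1:]
    let body := match tail.idxOf? "" with       -- tail.index("") / ValueError
      | some j => tail.take j
      | none => tail
    ((body.countP (fun s => PySem.Str.strIsdigit ((PySem.Str.split₀ s).headD ""))) : Int)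

-- ===== PRECONDITION & SPEC =====
def Spec_parse_rea_py (lines : List String) (out : Int) : Prop := out = parse_rea_py_alt lines
instance (lines : List String) (out : Int) : Decidable (Spec_parse_rea_py lines out) := by unfold Spec_parse_rea_py; infer_instance

-- ===== CLAIM (what is proved, stated in full; the proofs are below) =====
def Claim_equal_parse_rea_py : Prop := ∀ (lines : List String), Dom_parse_rea_py lines → Spec_parse_rea_py lines (parse_rea_py lines)

-- ===== LEMMAS AND PROOFS =====

-- the row test both programs apply inside the table
def pvPred (s : String) : Bool := PySem.Str.strIsdigit ((PySem.Str.split₀ s).headD "")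

-- B's count of the table body, as a function of the (stripped) tail after the header
def tailCount (tl : List String) : Int :=
  match tl.idxOf? "" with
  | some j => ((tl.take j).countP pvPred : Int)
  | none => (tl.countP pvPred : Int)

theorem go_flush (cs : List Char) : ∀ (cur : List Char) (acc : List (List Char)),
    PySem.Chars.split₀.go cs cur acc = acc.reverse ++ PySem.Chars.split₀.go cs cur [] := by
  induction cs with
  | nil =>
    intro cur acc
    simp only [PySem.Chars.split₀.go]
    by_cases h : cur.isEmpty <;> simp [h]
  | cons c rest ih =>
    intro cur acc
    simp only [PySem.Chars.split₀.go]
    split_ifs with h1 h2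
    · exact ih [] acc
    · rw [ih [] (cur.reverse :: acc), ih [] [cur.reverse]]; simp
    · exact ih (c :: cur) acc

theorem go_cons (cs : List Char) : ∀ (cur : List Char), cur ≠ [] →
    ∃ t, PySem.Chars.split₀.go cs cur [] =
      (cur.reverse ++ cs.takeWhile (fun c => !PySem.Chars.isspace c)) :: t := by
  induction cs with
  | nil =>
    intro cur h
    refine ⟨[], ?_⟩
    simp [PySem.Chars.split₀.go, h]
  | cons c rest ih =>
    intro cur h
    simp only [PySem.Chars.split₀.go]
    split_ifs with h1 h2
    · exact absurd (List.isEmpty_iff.mp h2) h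
    · refine ⟨PySem.Chars.split₀.go rest [] [], ?_⟩
      rw [go_flush rest [] [cur.reverse]]
      simp [h1]
    · obtain ⟨t, ht⟩ := ih (c :: cur) (by simp)
      refine ⟨t, ?_⟩
      rw [ht]
      simp [h1]

theorem pred_false (s : String) (c : Char) (cs : List Char) (h : s.toList = c :: cs)
    (hd : PySem.Chars.isdigit c = false) (hsp : PySem.Chars.isspace c = false) :
    pvPred s = false := by
  obtain ⟨t, ht⟩ := go_cons cs [c] (by simp)
  unfold pvPred
  have hs : PySem.Str.split₀ s = (PySem.Chars.split₀ s.toList).map String.ofList := rfl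
  rw [hs, h]
  have : PySem.Chars.split₀ (c :: cs) = PySem.Chars.split₀.go cs [c] [] := by
    simp only [PySem.Chars.split₀, PySem.Chars.split₀.go, hsp]
    simp
  rw [this, ht]
  simp [PySem.Str.strIsdigit, PySem.Chars.strIsdigit, hd]

theorem head_of_startswith (s p : String) (c : Char)
    (hc : p.toList.head? = some c) (h : PySem.Str.startswith s p = true) :
    ∃ t, s.toList = c :: t := by
  have h2 : PySem.Chars.startswith s.toList p.toList = true := by simpa using h
  obtain ⟨u, hu⟩ := (PySem.Chars.startswith_iff _ _).mp h2
  cases hp : p.toList with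
  | nil => rw [hp] at hc; simp at hc
  | cons c' cs =>
    rw [hp] at hc hu
    simp only [List.head?_cons, Option.some.injEq] at hc
    exact ⟨cs ++ u, by rw [← hu, hc]; simp⟩

theorem ne_empty_of_shape (s : String) (c : Char) (t : List Char) (h : s.toList = c :: t) :
    s ≠ "" := by
  intro he; rw [he] at h; simp at h

theorem tailCount_nil : tailCount [] = 0 := by simp [tailCount, List.idxOf?]

theorem tailCount_cons (s : String) (l : List String) (h : s ≠ "") :
    tailCount (s :: l) = (if pvPred s then 1 else 0) + tailCount l := by
  have hb : (s == "") = false := by simpa using h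
  unfold tailCount
  rw [List.idxOf?_cons, hb]
  cases hx : List.idxOf? "" l with
  | none =>
    simp only [Bool.false_eq_true, if_false, Option.map_none, List.countP_cons]
    push_cast
    by_cases hp : pvPred s = true <;> simp [hp] <;> omega
  | some j =>
    simp only [Bool.false_eq_true, if_false, Option.map_some, List.take_succ_cons,
      List.countP_cons]
    push_cast
    by_cases hp : pvPred s = true <;> simp [hp] <;> omega

theorem tailCount_cons_empty (l : List String) : tailCount ("" :: l) = 0 := by
  simp [tailCount, List.idxOf?_cons]

theorem goA_true (lines : List String) : ∀ (c : Int),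
    parseReaGo lines true c = c + tailCount (lines.map PySem.Str.strip) := by
  induction lines with
  | nil => intro c; simp [parseReaGo, tailCount_nil]
  | cons line rest ih =>
    intro c
    simp only [parseReaGo, List.map_cons]
    split_ifs with h1 h2 h3 h4
    · obtain ⟨t, ht⟩ := head_of_startswith _ "Ready threads:" 'R' (by decide) h1
      rw [ih, tailCount_cons _ _ (ne_empty_of_shape _ _ _ ht),
        pred_false _ 'R' t ht (by decide) (by decide)]
      simp
    · obtain ⟨t, ht⟩ := head_of_startswith _ "tid" 't' (by decide) h2
      rw [ih, tailCount_cons _ _ (ne_empty_of_shape _ _ _ ht),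
        pred_false _ 't' t ht (by decide) (by decide)]
      simp
    · rw [h3, tailCount_cons_empty]; omega
    · rw [ih, tailCount_cons _ _ h3]
      have hp : pvPred (PySem.Str.strip line) = true := h4
      rw [hp]; simp; omega
    · rw [ih, tailCount_cons _ _ h3]
      have hp : pvPred (PySem.Str.strip line) = false := Bool.eq_false_iff.mpr h4
      rw [hp]; simp

theorem alt_cons_hdr (line : String) (rest : List String)
    (h1 : PySem.Str.startswith (PySem.Str.strip line) "Ready threads:" = true) :
    parse_rea_py_alt (line :: rest) = tailCount (rest.map PySem.Str.strip) := by
  simp only [parse_rea_py_alt, List.map_cons, List.findIdx?_cons, h1, if_true,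
    Nat.zero_add, List.drop_succ_cons, List.drop_zero]
  unfold tailCount
  cases List.idxOf? "" (rest.map PySem.Str.strip) <;> rfl

theorem alt_cons_not (line : String) (rest : List String)
    (h1 : ¬ PySem.Str.startswith (PySem.Str.strip line) "Ready threads:" = true) :
    parse_rea_py_alt (line :: rest) = parse_rea_py_alt rest := by
  simp only [parse_rea_py_alt, List.map_cons, List.findIdx?_cons, if_neg h1]
  cases hx : List.findIdx? (fun s => PySem.Str.startswith s "Ready threads:")
      (rest.map PySem.Str.strip) with
  | none => simp
  | some i => simp only [Option.map_some, List.drop_succ_cons]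

theorem goA_false (lines : List String) : ∀ (c : Int),
    parseReaGo lines false c = c + parse_rea_py_alt lines := by
  induction lines with
  | nil => intro c; simp [parseReaGo, parse_rea_py_alt]
  | cons line rest ih =>
    intro c
    by_cases h1 : PySem.Str.startswith (PySem.Str.strip line) "Ready threads:" = true
    · rw [show parseReaGo (line :: rest) false c = parseReaGo rest true c by
        simp only [parseReaGo, h1, if_true], goA_true, alt_cons_hdr _ _ h1]
    · rw [show parseReaGo (line :: rest) false c = parseReaGo rest false c by
        simp only [parseReaGo, if_neg h1, Bool.false_eq_true, if_false],
        ih, alt_cons_not _ _ h1]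

-- ===== VERDICT (by name: the statement is the Claim_ definition above) =====
theorem parse_rea_py_spec : Claim_equal_parse_rea_py := by
  intro lines _
  show parse_rea_py lines = parse_rea_py_alt lines
  have := goA_false lines 0
  simpa [parse_rea_py] using this
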